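-- pv_equiv track=rewrite | github.com/lihaojia24/leetcode | python/2397.py | maximumRows
-- ===== SOURCE A (Python) =====
-- from typing import List
--
-- def maximumRows(matrix: List[List[int]], numSelect: int) -> int:
--     # m, n = len(matrix), len(matrix[0])
--     masks = [sum(x << j for j, x in enumerate(row)) for row in matrix]
--     ans = 0
--     for subnet in range(1 << len(matrix[0])):
--         if subnet.bit_count() == numSelect:
--             covered_rows = sum( subnet & mask == mask for mask in masks)
--             ans = max(ans, covered_rows)
--     return ans
-- ===== SOURCE B (Python) =====
-- def maximumRows(matrix, numSelect):
--     n = len(matrix[0])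
--     masks = [sum(x << j for j, x in enumerate(row)) for row in matrix]
--
--     def coverage(mask):
--         return sum(1 for m in masks if mask & m == m)
--
--     def go(col, cnt, mask, best):
--         if col < 0:
--             return max(best, coverage(mask)) if cnt == numSelect else best
--         best = go(col - 1, cnt, mask, best)          # skip column col
--         return go(col - 1, cnt + 1, mask + (1 << col), best)  # take column col
--     return go(n - 1, 0, 0, 0)
-- ===== Notes on version B (the rewrite author's own statement) =====
-- stated objective: alternative
-- what changed: Replaces A's linear scan of all 2^n integers filtered by bit_count with a recursive include/exclude backtracking over column indices that tracks the chosen-column count and accumulated column mask incrementally.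
-- outside the precondition, e.g. on maximumRows([], 0): A raises IndexError, B raises IndexError
import Mathlib
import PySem

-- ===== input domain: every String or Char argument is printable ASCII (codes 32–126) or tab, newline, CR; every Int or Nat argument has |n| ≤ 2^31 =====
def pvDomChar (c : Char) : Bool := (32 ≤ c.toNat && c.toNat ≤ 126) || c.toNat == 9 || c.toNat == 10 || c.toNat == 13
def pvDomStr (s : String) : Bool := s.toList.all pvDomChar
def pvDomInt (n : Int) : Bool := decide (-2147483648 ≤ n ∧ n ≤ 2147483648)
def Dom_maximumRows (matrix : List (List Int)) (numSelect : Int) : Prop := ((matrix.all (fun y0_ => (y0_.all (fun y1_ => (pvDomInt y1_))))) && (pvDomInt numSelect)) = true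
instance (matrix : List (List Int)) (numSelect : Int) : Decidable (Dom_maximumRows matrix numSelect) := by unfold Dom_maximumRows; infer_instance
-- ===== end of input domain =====

-- B replaces A's scan of all 2^n integers (filtered by bit_count) with include/exclude
-- backtracking over columns; same answers, similar cost (objective: alternative).

-- ===== PORT A =====
-- row mask: sum(x << j for j, x in enumerate(row)); x << j = x * 2^j exactly (j ≥ 0)
def pvRowMask (row : List Int) : Int :=
  ((PySem.List.enumerate row 0).map (fun jx => jx.2 * 2 ^ jx.1.toNat)).sum

-- matrix[0] is ported as matrix.headD [] (Pre_ excludes matrix = [], where Python raises)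
def maximumRows (matrix : List (List Int)) (numSelect : Int) : Int :=
  let masks := matrix.map pvRowMask
  (PySem.List.pyRange 0 (2 ^ (matrix.headD []).length) 1).foldl
    (fun ans subnet =>
      if (PySem.Int.bitCount subnet : Int) = numSelect then
        max ans ((masks.map (fun mask =>
          if PySem.Int.band subnet mask = mask then (1 : Int) else 0)).sum)
      else ans) 0

-- ===== PORT B =====
def pvCoverage (masks : List Int) (mask : Int) : Int :=
  (masks.map (fun m => if PySem.Int.band mask m = m then (1 : Int) else 0)).sum

-- Python's go(col, cnt, mask, best) with col ∈ {-1, …, n-1} is pvGo … (col+1) cnt mask best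
def pvGo (masks : List Int) (numSelect : Int) : Nat → Int → Int → Int → Int
  | 0, cnt, mask, best =>
      if cnt = numSelect then max best (pvCoverage masks mask) else best
  | c + 1, cnt, mask, best =>
      pvGo masks numSelect c (cnt + 1) (mask + 2 ^ c)
        (pvGo masks numSelect c cnt mask best)

def maximumRows_alt (matrix : List (List Int)) (numSelect : Int) : Int :=
  let masks := matrix.map pvRowMask
  pvGo masks numSelect (matrix.headD []).length 0 0 0

-- ===== PRECONDITION & SPEC =====
-- Pre_ excludes only the empty matrix, on which both Pythons raise IndexError at matrix[0].
def Pre_maximumRows (matrix : List (List Int)) (numSelect : Int) : Prop := matrix ≠ []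
instance (matrix : List (List Int)) (numSelect : Int) : Decidable (Pre_maximumRows matrix numSelect) := by
  unfold Pre_maximumRows; infer_instance

def pvWitness_maximumRows : List (List Int) × Int := ([[1, 0], [0, 1]], 1)

def Spec_maximumRows (matrix : List (List Int)) (numSelect : Int) (out : Int) : Prop := out = maximumRows_alt matrix numSelect
instance (matrix : List (List Int)) (numSelect : Int) (out : Int) : Decidable (Spec_maximumRows matrix numSelect out) := by unfold Spec_maximumRows; infer_instance

-- ===== CLAIM (what is proved, stated in full; the proofs are below) =====
def Claim_equal_maximumRows : Prop := ∀ (matrix : List (List Int)) (numSelect : Int), Dom_maximumRows matrix numSelect → Pre_maximumRows matrix numSelect → Spec_maximumRows matrix numSelect (maximumRows matrix numSelect)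

-- ===== LEMMAS AND PROOFS =====

-- popcount is additive when the two summands occupy disjoint bit ranges
theorem pvBitCount_add (k : Nat) : ∀ (M s : Nat), M % 2 ^ k = 0 → s < 2 ^ k →
    PySem.Int.bitCount ((M + s : Nat) : Int)
      = PySem.Int.bitCount (M : Int) + PySem.Int.bitCount (s : Int) := by
  induction k with
  | zero =>
      intro M s _ hs
      interval_cases s
      simp
  | succ k ih =>
      intro M s hM hs
      rcases Nat.eq_zero_or_pos M with hM0 | hM0
      · subst hM0; simp
      rcases Nat.eq_zero_or_pos s with hs0 | hs0
      · subst hs0; simp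
      have hpow : 2 ^ (k + 1) = 2 * 2 ^ k := by ring
      obtain ⟨t, ht⟩ := Nat.dvd_of_mod_eq_zero hM
      have hM2 : M / 2 = 2 ^ k * t := by
        subst ht; rw [hpow]; rw [Nat.mul_assoc, Nat.mul_div_cancel_left _ (by norm_num)]
      have hM2' : M = 2 * (2 ^ k * t) := by rw [ht, hpow]; ring
      have hMeven : M % 2 = 0 := by rw [hM2']; exact Nat.mul_mod_right 2 _
      have hMS : 0 < M + s := by omega
      rw [PySem.Int.bitCount_natCast (m := M + s) hMS,
          PySem.Int.bitCount_natCast (m := M) hM0,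
          PySem.Int.bitCount_natCast (m := s) hs0]
      have h1 : (M + s) / 2 = M / 2 + s / 2 := by omega
      have h2 : (M + s) % 2 = s % 2 := by omega
      rw [h1, h2, ih (M / 2) (s / 2) (by rw [hM2]; exact Nat.mul_mod_right _ _) (by omega)]
      omega

theorem pvBitCount_two_pow (c : Nat) :
    PySem.Int.bitCount ((2 ^ c : Nat) : Int) = 1 := by
  induction c with
  | zero => decide
  | succ c ih =>
      have hpos : 0 < 2 ^ (c + 1) := Nat.two_pow_pos _
      rw [PySem.Int.bitCount_natCast (m := 2 ^ (c + 1)) hpos]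
      have hpow : 2 ^ (c + 1) = 2 * 2 ^ c := by ring
      have h1 : 2 ^ (c + 1) % 2 = 0 := by omega
      have h2 : 2 ^ (c + 1) / 2 = 2 ^ c := by omega
      rw [h1, h2, ih]

-- the backtracking over c remaining low columns equals A's linear scan of the
-- 2^c low subnets added on top of the fixed high part M
theorem pvGo_eq (masks : List Int) (numSelect : Int) :
    ∀ (c : Nat) (M : Nat) (best : Int), M % 2 ^ c = 0 →
      pvGo masks numSelect c ((PySem.Int.bitCount (M : Int) : Nat) : Int) (M : Int) best
        = (List.range (2 ^ c)).foldl
            (fun ans s =>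
              if ((PySem.Int.bitCount ((M + s : Nat) : Int) : Nat) : Int) = numSelect then
                max ans (pvCoverage masks ((M + s : Nat) : Int))
              else ans) best := by
  intro c
  induction c with
  | zero =>
      intro M best _
      simp [pvGo, pow_zero, List.range_one]
  | succ c ih =>
      intro M best hM
      have hdvd : M % 2 ^ c = 0 := by
        obtain ⟨t, ht⟩ := Nat.dvd_of_mod_eq_zero hM
        subst ht
        have : 2 ^ (c + 1) = 2 ^ c * 2 := by ring
        rw [this, Nat.mul_assoc]
        exact Nat.mul_mod_right _ _
      have hlt : 2 ^ c < 2 ^ (c + 1) := by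
        have : 2 ^ (c + 1) = 2 * 2 ^ c := by ring
        omega
      have hM' : (M + 2 ^ c) % 2 ^ c = 0 := by
        rw [Nat.add_mod_right]; exact hdvd
      have hbc : PySem.Int.bitCount (((M + 2 ^ c : Nat)) : Int)
          = PySem.Int.bitCount (M : Int) + 1 := by
        rw [pvBitCount_add (k := c + 1) M (2 ^ c) hM hlt, pvBitCount_two_pow]
      -- unfold one level of pvGo
      show pvGo masks numSelect c (((PySem.Int.bitCount (M : Int) : Nat) : Int) + 1)
        ((M : Int) + 2 ^ c) (pvGo masks numSelect c ((PySem.Int.bitCount (M : Int) : Nat) : Int) (M : Int) best) = _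
      have hcastm : ((M : Int) + 2 ^ c) = (((M + 2 ^ c : Nat)) : Int) := by push_cast; ring
      have hcastc : (((PySem.Int.bitCount (M : Int) : Nat) : Int) + 1)
          = ((PySem.Int.bitCount (((M + 2 ^ c : Nat)) : Int) : Nat) : Int) := by
        rw [hbc]; push_cast; ring
      rw [ih M best hdvd, hcastm, hcastc, ih (M + 2 ^ c) _ hM']
      have hsplit : (2 : Nat) ^ (c + 1) = 2 ^ c + 2 ^ c := by ring
      rw [hsplit, List.range_add, List.foldl_append, List.foldl_map]
      congr 1
      funext ans s
      rw [show M + (2 ^ c + s) = (M + 2 ^ c) + s from by omega]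

-- ===== VERDICT (by name: the statement is the Claim_ definition above) =====
theorem maximumRows_spec : Claim_equal_maximumRows := by
  intro matrix numSelect _ _
  unfold Spec_maximumRows maximumRows maximumRows_alt
  have h := pvGo_eq (matrix.map pvRowMask) numSelect ((matrix.headD []).length) 0 0
    (by simp)
  simp only [Nat.cast_zero, PySem.Int.bitCount_zero, Nat.zero_add, pvCoverage] at h
  rw [PySem.List.pyRange_one, List.foldl_map]
  have hb : ((2 : Int) ^ (matrix.headD []).length - 0).toNat = 2 ^ (matrix.headD []).length := by
    rw [Int.sub_zero,
      show ((2 : Int) ^ (matrix.headD []).length)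
          = ((2 ^ (matrix.headD []).length : Nat) : Int) by push_cast; ring,
      Int.toNat_natCast]
  rw [hb]
  simp only [zero_add]
  exact h.symm
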